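-- pv_equiv track=rewrite | github.com/Mikosztyla/UniversityProgramms | WDI_sets/Arrays_2_dimensional/17.py | best_neighbours
-- ===== SOURCE A (Python) =====
-- def best_neighbours(tab, n):
--     max_s, s = 0, 0
--     max_i, max_j = 0, 0
--     for i in range(n):
--         for j in range(n):
--             s = 0
--             if i - 1 >= 0:
--                 s += tab[i-1][j]
--             if j + 1 < n:
--                 s += tab[i][j+1]
--             if i + 1 < n:
--                 s += tab[i+1][j]
--             if j - 1 >= 0:
--                 s += tab[i][j-1]
--
--             if s > max_s:
--                 max_s = s
--                 max_i = i
--                 max_j = j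
--     return max_i, max_j, max_s
-- ===== SOURCE B (Python) =====
-- def best_neighbours(tab, n):
--     # scatter: each cell adds its value to its in-bounds orthogonal neighbours' totals
--     acc = {}
--     for i in range(n):
--         for j in range(n):
--             v = tab[i][j]
--             for a, b in ((i - 1, j), (i, j + 1), (i + 1, j), (i, j - 1)):
--                 if 0 <= a < n and 0 <= b < n:
--                     acc[(a, b)] = acc.get((a, b), 0) + v
--     max_i, max_j, max_s = 0, 0, 0
--     for i in range(n):
--         for j in range(n):
--             s = acc.get((i, j), 0)
--             if s > max_s:
--                 max_i, max_j, max_s = i, j, s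
--     return max_i, max_j, max_s
-- ===== Notes on version B (the rewrite author's own statement) =====
-- stated objective: alternative
-- what changed: Replaces the per-cell gather of the four neighbour values by a scatter pass that adds each cell's value into an accumulator dictionary entry of each in-bounds orthogonal neighbour, then a second row-major scan of the accumulator for the strict-> argmax.
-- outside the precondition, e.g. on best_neighbours([], 1): A returns (0, 0, 0), B raises IndexError
import Mathlib
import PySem

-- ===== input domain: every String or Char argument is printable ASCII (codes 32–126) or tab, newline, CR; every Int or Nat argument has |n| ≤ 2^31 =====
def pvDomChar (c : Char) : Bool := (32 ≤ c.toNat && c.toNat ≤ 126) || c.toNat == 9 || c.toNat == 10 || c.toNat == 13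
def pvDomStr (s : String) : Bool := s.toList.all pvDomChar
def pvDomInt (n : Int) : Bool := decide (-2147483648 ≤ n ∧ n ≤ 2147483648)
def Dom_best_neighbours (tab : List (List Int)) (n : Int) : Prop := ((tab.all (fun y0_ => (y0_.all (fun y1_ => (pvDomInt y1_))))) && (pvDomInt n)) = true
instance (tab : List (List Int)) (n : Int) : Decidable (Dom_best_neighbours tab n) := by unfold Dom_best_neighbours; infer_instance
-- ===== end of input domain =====

-- B replaces A's per-cell gather of neighbour values by a scatter pass into an
-- accumulator dictionary followed by a row-major argmax scan (alternative decomposition, same cost).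


-- shared indexing primitive: tab[i][j] (total form; Pre_ excludes the raising inputs)
def pvCell (tab : List (List Int)) (i j : Int) : Int :=
  PySem.List.pyGetD (PySem.List.pyGetD tab i []) j 0

-- ===== PORT A =====
def best_neighbours (tab : List (List Int)) (n : Int) : Int × Int × Int :=
  (PySem.List.pyRange 0 n 1).foldl (fun st i =>
    (PySem.List.pyRange 0 n 1).foldl (fun st j =>
      let s : Int := 0
      let s := if i - 1 ≥ 0 then s + pvCell tab (i - 1) j else s
      let s := if j + 1 < n then s + pvCell tab i (j + 1) else s
      let s := if i + 1 < n then s + pvCell tab (i + 1) j else s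
      let s := if j - 1 ≥ 0 then s + pvCell tab i (j - 1) else s
      if s > st.2.2 then (i, j, s) else st) st) (0, 0, 0)

-- ===== PORT B =====
-- one scatter step: cell (p,q) with value v adds v to each in-bounds orthogonal neighbour's entry
def pvScatterStep (n v i j : Int) (acc : PySem.Dict (Int × Int) Int) : PySem.Dict (Int × Int) Int :=
  [(i - 1, j), (i, j + 1), (i + 1, j), (i, j - 1)].foldl
    (fun acc ab =>
      if 0 ≤ ab.1 ∧ ab.1 < n ∧ 0 ≤ ab.2 ∧ ab.2 < n
      then acc.insert ab (acc.getD ab 0 + v) else acc) acc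

-- the accumulator dictionary built by B's first (scatter) double loop
def pvAcc (tab : List (List Int)) (n : Int) : PySem.Dict (Int × Int) Int :=
  (PySem.List.pyRange 0 n 1).foldl (fun acc i =>
    (PySem.List.pyRange 0 n 1).foldl (fun acc j =>
      pvScatterStep n (pvCell tab i j) i j acc) acc) PySem.Dict.empty

def best_neighbours_alt (tab : List (List Int)) (n : Int) : Int × Int × Int :=
  let acc := pvAcc tab n
  (PySem.List.pyRange 0 n 1).foldl (fun st i =>
    (PySem.List.pyRange 0 n 1).foldl (fun st j =>
      let s := acc.getD (i, j) 0
      if s > st.2.2 then (i, j, s) else st) st) (0, 0, 0)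

-- ===== PRECONDITION & SPEC =====
-- Pre_ excludes n = 1 with a table lacking cell (0,0): there A's loop body never
-- indexes the table (all four neighbour guards are false) and returns (0,0,0),
-- while B reads each cell once and raises IndexError; every other excluded input makes A raise too.
def Pre_best_neighbours (tab : List (List Int)) (n : Int) : Prop :=
  n ≤ 0 ∨ (n ≤ tab.length ∧ ∀ row ∈ tab.take n.toNat, n ≤ (row.length : Int))
instance (tab : List (List Int)) (n : Int) : Decidable (Pre_best_neighbours tab n) := by
  unfold Pre_best_neighbours; infer_instance

def pvWitness_best_neighbours : List (List Int) × Int := ([[1, 2], [3, 4]], 2)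

def Spec_best_neighbours (tab : List (List Int)) (n : Int) (out : Int × Int × Int) : Prop := out = best_neighbours_alt tab n
instance (tab : List (List Int)) (n : Int) (out : Int × Int × Int) : Decidable (Spec_best_neighbours tab n out) := by unfold Spec_best_neighbours; infer_instance

-- ===== CLAIM (what is proved, stated in full; the proofs are below) =====
def Claim_equal_best_neighbours : Prop := ∀ (tab : List (List Int)) (n : Int), Dom_best_neighbours tab n → Pre_best_neighbours tab n → Spec_best_neighbours tab n (best_neighbours tab n)

-- ===== LEMMAS AND PROOFS =====

-- the value A's loop body gathers for cell (i,j)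
def pvGatherSum (tab : List (List Int)) (n i j : Int) : Int :=
  (if i - 1 ≥ 0 then pvCell tab (i - 1) j else 0)
  + (if j + 1 < n then pvCell tab i (j + 1) else 0)
  + (if i + 1 < n then pvCell tab (i + 1) j else 0)
  + (if j - 1 ≥ 0 then pvCell tab i (j - 1) else 0)

-- the contribution of processed cell (p,q) to the accumulator entry of in-grid cell (i,j)
def pvContrib (v p q i j : Int) : Int :=
  (if p = i + 1 ∧ q = j then v else 0) + (if p = i ∧ q = j - 1 then v else 0) +
  (if p = i - 1 ∧ q = j then v else 0) + (if p = i ∧ q = j + 1 then v else 0)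

theorem pvFoldCond_getD (n v : Int) (ks : List (Int × Int)) (acc : PySem.Dict (Int × Int) Int)
    (x : Int × Int) (hx : 0 ≤ x.1 ∧ x.1 < n ∧ 0 ≤ x.2 ∧ x.2 < n) :
    (ks.foldl (fun acc ab =>
        if 0 ≤ ab.1 ∧ ab.1 < n ∧ 0 ≤ ab.2 ∧ ab.2 < n
        then acc.insert ab (acc.getD ab 0 + v) else acc) acc).getD x 0
      = acc.getD x 0 + (ks.map (fun ab => if ab = x then v else 0)).sum := by
  induction ks generalizing acc with
  | nil => simp
  | cons ab ks ih =>
    simp only [List.foldl_cons, List.map_cons, List.sum_cons]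
    rw [ih]
    have hstep : ((if 0 ≤ ab.1 ∧ ab.1 < n ∧ 0 ≤ ab.2 ∧ ab.2 < n
          then acc.insert ab (acc.getD ab 0 + v) else acc).getD x 0)
        = acc.getD x 0 + (if ab = x then v else 0) := by
      by_cases he : ab = x
      · subst he; rw [if_pos hx, PySem.Dict.getD_insert_self, if_pos rfl]
      · by_cases hg : 0 ≤ ab.1 ∧ ab.1 < n ∧ 0 ≤ ab.2 ∧ ab.2 < n
        · rw [if_pos hg, PySem.Dict.getD_insert, if_neg (fun h => he h.symm), if_neg he, add_zero]
        · rw [if_neg hg, if_neg he, add_zero]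
    rw [hstep]; ring

theorem pvStep_getD (n v p q i j : Int) (acc : PySem.Dict (Int × Int) Int)
    (hi0 : 0 ≤ i) (hin : i < n) (hj0 : 0 ≤ j) (hjn : j < n) :
    (pvScatterStep n v p q acc).getD (i, j) 0 = acc.getD (i, j) 0 + pvContrib v p q i j := by
  simp only [pvScatterStep]
  rw [pvFoldCond_getD n v _ acc (i, j) ⟨hi0, hin, hj0, hjn⟩]
  simp only [List.map_cons, List.map_nil, List.sum_cons, List.sum_nil]
  have e1 : (if ((p - 1, q) : Int × Int) = (i, j) then v else 0) = (if p = i + 1 ∧ q = j then v else 0) := by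
    simp only [Prod.mk.injEq]; split_ifs <;> first | (exfalso; omega) | rfl
  have e2 : (if ((p, q + 1) : Int × Int) = (i, j) then v else 0) = (if p = i ∧ q = j - 1 then v else 0) := by
    simp only [Prod.mk.injEq]; split_ifs <;> first | (exfalso; omega) | rfl
  have e3 : (if ((p + 1, q) : Int × Int) = (i, j) then v else 0) = (if p = i - 1 ∧ q = j then v else 0) := by
    simp only [Prod.mk.injEq]; split_ifs <;> first | (exfalso; omega) | rfl
  have e4 : (if ((p, q - 1) : Int × Int) = (i, j) then v else 0) = (if p = i ∧ q = j + 1 then v else 0) := by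
    simp only [Prod.mk.injEq]; split_ifs <;> first | (exfalso; omega) | rfl
  rw [e1, e2, e3, e4]
  simp only [pvContrib]; ring

theorem pvFold_getD (tab : List (List Int)) (n : Int) (cs : List (Int × Int))
    (acc : PySem.Dict (Int × Int) Int) (i j : Int)
    (hi0 : 0 ≤ i) (hin : i < n) (hj0 : 0 ≤ j) (hjn : j < n) :
    (cs.foldl (fun acc pq => pvScatterStep n (pvCell tab pq.1 pq.2) pq.1 pq.2 acc) acc).getD (i, j) 0
      = acc.getD (i, j) 0 + (cs.map (fun pq => pvContrib (pvCell tab pq.1 pq.2) pq.1 pq.2 i j)).sum := by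
  induction cs generalizing acc with
  | nil => simp
  | cons pq cs ih =>
    simp only [List.foldl_cons, List.map_cons, List.sum_cons]
    rw [ih, pvStep_getD n _ pq.1 pq.2 i j acc hi0 hin hj0 hjn]
    ring

theorem pvSum_ite_rangeN (m : Nat) (a P : Int) (f : Int → Int) :
    ((List.range m).map (fun k : Nat => if a + (k : Int) = P then f (a + (k : Int)) else 0)).sum
      = if a ≤ P ∧ P < a + (m : Int) then f P else 0 := by
  induction m with
  | zero =>
    simp only [List.range_zero, List.map_nil, List.sum_nil, Nat.cast_zero]
    split_ifs with h
    · exfalso; omega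
    · rfl
  | succ m ih =>
    rw [List.range_succ, List.map_append, List.sum_append, ih]
    simp only [List.map_cons, List.map_nil, List.sum_cons, List.sum_nil, Nat.cast_add, Nat.cast_one]
    by_cases h : a + (m : Int) = P
    · subst h
      split_ifs <;> first | (exfalso; omega) | ring
    · rw [if_neg h]
      split_ifs <;> first | (exfalso; omega) | ring

theorem pvSum_ite_range (a b P : Int) (f : Int → Int) :
    ((PySem.List.pyRange a b 1).map (fun p => if p = P then f p else 0)).sum
      = if a ≤ P ∧ P < b then f P else 0 := by
  rw [PySem.List.pyRange_one, List.map_map]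
  simp only [Function.comp_def]
  rw [pvSum_ite_rangeN]
  split_ifs <;> first | (exfalso; omega) | rfl

theorem pvSwap_ite (c d : Prop) [Decidable c] [Decidable d] (v : Int) :
    (if c ∧ d then v else 0) = if d then (if c then v else 0) else 0 := by
  split_ifs <;> simp_all

theorem pvSum_map_add4 (l : List Int) (f g h k : Int → Int) :
    (l.map (fun x => f x + g x + h x + k x)).sum
      = (l.map f).sum + (l.map g).sum + (l.map h).sum + (l.map k).sum := by
  rw [PySem.List.sum_map_add_int l (fun x => f x + g x + h x) k,
      PySem.List.sum_map_add_int l (fun x => f x + g x) h,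
      PySem.List.sum_map_add_int l f g]

theorem pvInner_sum (tab : List (List Int)) (n i j p : Int) (hj0 : 0 ≤ j) (hjn : j < n) :
    ((PySem.List.pyRange 0 n 1).map (fun q => pvContrib (pvCell tab p q) p q i j)).sum
      = (if p = i + 1 then pvCell tab p j else 0)
      + (if p = i then (if j - 1 ≥ 0 then pvCell tab p (j - 1) else 0) else 0)
      + (if p = i - 1 then pvCell tab p j else 0)
      + (if p = i then (if j + 1 < n then pvCell tab p (j + 1) else 0) else 0) := by
  have hsplit : (fun q => pvContrib (pvCell tab p q) p q i j)
      = fun q => (if q = j then (if p = i + 1 then pvCell tab p q else 0) else 0)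
               + (if q = j - 1 then (if p = i then pvCell tab p q else 0) else 0)
               + (if q = j then (if p = i - 1 then pvCell tab p q else 0) else 0)
               + (if q = j + 1 then (if p = i then pvCell tab p q else 0) else 0) := by
    funext q; simp only [pvContrib, pvSwap_ite]
  rw [hsplit, pvSum_map_add4, pvSum_ite_range, pvSum_ite_range, pvSum_ite_range, pvSum_ite_range]
  have c1 : (if 0 ≤ j ∧ j < n then (if p = i + 1 then pvCell tab p j else 0) else 0)
      = if p = i + 1 then pvCell tab p j else 0 := by
    split_ifs <;> first | (exfalso; omega) | rfl
  have c2 : (if 0 ≤ j - 1 ∧ j - 1 < n then (if p = i then pvCell tab p (j - 1) else 0) else 0)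
      = if p = i then (if j - 1 ≥ 0 then pvCell tab p (j - 1) else 0) else 0 := by
    split_ifs <;> first | (exfalso; omega) | rfl
  have c3 : (if 0 ≤ j ∧ j < n then (if p = i - 1 then pvCell tab p j else 0) else 0)
      = if p = i - 1 then pvCell tab p j else 0 := by
    split_ifs <;> first | (exfalso; omega) | rfl
  have c4 : (if 0 ≤ j + 1 ∧ j + 1 < n then (if p = i then pvCell tab p (j + 1) else 0) else 0)
      = if p = i then (if j + 1 < n then pvCell tab p (j + 1) else 0) else 0 := by
    split_ifs <;> first | (exfalso; omega) | rfl
  rw [c1, c2, c3, c4]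

theorem pvCells_sum (tab : List (List Int)) (n i j : Int)
    (hi0 : 0 ≤ i) (hin : i < n) (hj0 : 0 ≤ j) (hjn : j < n) :
    ((PySem.List.pyRange 0 n 1).map (fun p =>
        ((PySem.List.pyRange 0 n 1).map (fun q => pvContrib (pvCell tab p q) p q i j)).sum)).sum
      = pvGatherSum tab n i j := by
  have h1 : (fun p => ((PySem.List.pyRange 0 n 1).map (fun q => pvContrib (pvCell tab p q) p q i j)).sum)
      = fun p => (if p = i + 1 then pvCell tab p j else 0)
               + (if p = i then (if j - 1 ≥ 0 then pvCell tab p (j - 1) else 0) else 0)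
               + (if p = i - 1 then pvCell tab p j else 0)
               + (if p = i then (if j + 1 < n then pvCell tab p (j + 1) else 0) else 0) :=
    funext fun p => pvInner_sum tab n i j p hj0 hjn
  rw [h1, pvSum_map_add4, pvSum_ite_range, pvSum_ite_range, pvSum_ite_range, pvSum_ite_range]
  have d1 : (if 0 ≤ i + 1 ∧ i + 1 < n then pvCell tab (i + 1) j else 0)
      = if i + 1 < n then pvCell tab (i + 1) j else 0 := by
    split_ifs <;> first | (exfalso; omega) | rfl
  have d2 : (if 0 ≤ i ∧ i < n then (if j - 1 ≥ 0 then pvCell tab i (j - 1) else 0) else 0)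
      = if j - 1 ≥ 0 then pvCell tab i (j - 1) else 0 := by
    split_ifs <;> first | (exfalso; omega) | rfl
  have d3 : (if 0 ≤ i - 1 ∧ i - 1 < n then pvCell tab (i - 1) j else 0)
      = if i - 1 ≥ 0 then pvCell tab (i - 1) j else 0 := by
    split_ifs <;> first | (exfalso; omega) | rfl
  have d4 : (if 0 ≤ i ∧ i < n then (if j + 1 < n then pvCell tab i (j + 1) else 0) else 0)
      = if j + 1 < n then pvCell tab i (j + 1) else 0 := by
    split_ifs <;> first | (exfalso; omega) | rfl
  rw [d1, d2, d3, d4]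
  simp only [pvGatherSum]; ring

theorem pvAcc_getD (tab : List (List Int)) (n i j : Int)
    (hi0 : 0 ≤ i) (hin : i < n) (hj0 : 0 ≤ j) (hjn : j < n) :
    (pvAcc tab n).getD (i, j) 0 = pvGatherSum tab n i j := by
  have hacc : pvAcc tab n
      = ((PySem.List.pyRange 0 n 1).flatMap (fun p => (PySem.List.pyRange 0 n 1).map (fun q => (p, q)))).foldl
          (fun acc pq => pvScatterStep n (pvCell tab pq.1 pq.2) pq.1 pq.2 acc) PySem.Dict.empty := by
    rw [List.foldl_flatMap]
    unfold pvAcc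
    apply PySem.List.foldl_congr_mem'
    intro p _ acc
    rw [List.foldl_map]
  rw [hacc, pvFold_getD tab n _ _ i j hi0 hin hj0 hjn, PySem.Dict.getD_empty, zero_add,
      List.map_flatMap, List.flatMap_def, List.sum_flatten, List.map_map]
  simp only [Function.comp_def, List.map_map]
  exact pvCells_sum tab n i j hi0 hin hj0 hjn

theorem pvChain_eq (tab : List (List Int)) (n i j : Int) :
    (let s : Int := 0
     let s := if i - 1 ≥ 0 then s + pvCell tab (i - 1) j else s
     let s := if j + 1 < n then s + pvCell tab i (j + 1) else s
     let s := if i + 1 < n then s + pvCell tab (i + 1) j else s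
     let s := if j - 1 ≥ 0 then s + pvCell tab i (j - 1) else s
     s) = pvGatherSum tab n i j := by
  simp only [pvGatherSum]
  split_ifs <;> ring

-- ===== VERDICT (by name: the statement is the Claim_ definition above) =====
theorem best_neighbours_spec : Claim_equal_best_neighbours := by
  intro tab n _ _
  show best_neighbours tab n = best_neighbours_alt tab n
  unfold best_neighbours best_neighbours_alt
  apply PySem.List.foldl_congr_mem'
  intro i hi st
  apply PySem.List.foldl_congr_mem'
  intro j hj st'
  rw [PySem.List.mem_pyRange_one] at hi hj
  have hkey : (pvAcc tab n).getD (i, j) 0 = pvGatherSum tab n i j :=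
    pvAcc_getD tab n i j hi.1 hi.2 hj.1 hj.2
  dsimp only
  rw [hkey, ← pvChain_eq tab n i j]
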